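-- pv_equiv track=rewrite | github.com/charliebutter/fantasy-name-generator-web | fantasynamegen/generator.py | fix_capitalization
-- ===== SOURCE A (Python) =====
-- def fix_capitalization(name: str) -> str:
--     if not name: return ""
--     parts = []; current_part = ""
--     for char in name:
--         if char in "- ": parts.append(current_part); parts.append(char); current_part = ""
--         else: current_part += char
--     if current_part: parts.append(current_part)
--     capitalized_parts = [(part[0].upper() + part[1:]) if part and part not in "- " else part for part in parts]
--     return "".join(capitalized_parts)
-- ===== SOURCE B (Python) =====
-- def fix_capitalization(name: str) -> str:
--     # Single pass with a "start of word" flag instead of building a parts list and mapping over it.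
--     out = []
--     start = True
--     for ch in name:
--         if ch in "- ":
--             out.append(ch)
--             start = True
--         else:
--             out.append(ch.upper() if start else ch)
--             start = False
--     return "".join(out)
-- ===== Notes on version B (the rewrite author's own statement) =====
-- stated objective: simpler
-- what changed: Replaces A's two-phase build-a-parts-list-then-capitalize-and-join with a single pass over the characters carrying a word-start flag that uppercases exactly the first character after start/'-'/' '.
import Mathlib
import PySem

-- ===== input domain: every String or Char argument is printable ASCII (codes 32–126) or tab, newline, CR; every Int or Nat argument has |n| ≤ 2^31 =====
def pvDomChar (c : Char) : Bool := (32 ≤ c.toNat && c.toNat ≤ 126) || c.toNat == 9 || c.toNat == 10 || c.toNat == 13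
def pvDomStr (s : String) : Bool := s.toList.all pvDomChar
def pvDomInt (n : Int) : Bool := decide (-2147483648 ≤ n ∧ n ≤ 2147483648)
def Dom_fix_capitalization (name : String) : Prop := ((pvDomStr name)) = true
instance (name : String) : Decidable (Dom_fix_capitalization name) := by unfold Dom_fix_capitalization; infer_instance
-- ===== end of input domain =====

-- B replaces A's parts-list construction + capitalization map by one pass with a word-start flag (simpler, same cost).

-- ===== PORT A =====
-- loop body: char in "- " → flush current_part and the delimiter; else extend current_part
def stepA (st : List (List Char) × List Char) (c : Char) : List (List Char) × List Char :=
  if c = '-' ∨ c = ' ' then (st.1 ++ [st.2, [c]], []) else (st.1, st.2 ++ [c])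

-- (part[0].upper() + part[1:]) if part and part not in "- " else part
-- 'part not in "- "' is Python substring containment → PySem.Chars.isIn; part[0].upper() on one char → upperChar
def capPart (p : List Char) : List Char :=
  if p ≠ [] ∧ PySem.Chars.isIn p ['-', ' '] = false then
    match p with
    | [] => []
    | c :: t => PySem.Chars.upperChar c :: t
  else p

-- 'if current_part: parts.append(current_part)'
def finalParts (st : List (List Char) × List Char) : List (List Char) :=
  if st.2 ≠ [] then st.1 ++ [st.2] else st.1

def fix_capitalization (name : String) : String :=
  if name.toList = [] then "" else
    String.ofList (((finalParts (name.toList.foldl stepA ([], []))).map capPart).flatten)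

-- ===== PORT B =====
-- one pass: emit each char, uppercasing it exactly when the word-start flag is set
def stepB (st : List Char × Bool) (c : Char) : List Char × Bool :=
  if c = '-' ∨ c = ' ' then (st.1 ++ [c], true)
  else (st.1 ++ [if st.2 then PySem.Chars.upperChar c else c], false)

def fix_capitalization_alt (name : String) : String :=
  String.ofList (name.toList.foldl stepB ([], true)).1

-- ===== PRECONDITION & SPEC =====
def Spec_fix_capitalization (name : String) (out : String) : Prop := out = fix_capitalization_alt name
instance (name : String) (out : String) : Decidable (Spec_fix_capitalization name out) := by unfold Spec_fix_capitalization; infer_instance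

-- ===== CLAIM (what is proved, stated in full; the proofs are below) =====
def Claim_equal_fix_capitalization : Prop := ∀ (name : String), Dom_fix_capitalization name → Spec_fix_capitalization name (fix_capitalization name)

-- ===== LEMMAS AND PROOFS =====

theorem capPart_nil : capPart [] = [] := by decide

-- a nonempty list containing a non-delimiter char is not a substring of "- "
theorem capPart_cons_nondelim (c : Char) (t : List Char) (hc : ¬ (c = '-' ∨ c = ' ')) :
    capPart (c :: t) = PySem.Chars.upperChar c :: t := by
  unfold capPart
  rw [if_pos]
  refine ⟨by simp, ?_⟩
  rw [PySem.Chars.isIn_eq_false_iff]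
  intro hinf
  have := hinf.subset (List.mem_cons_self (a := c) (l := t))
  simp at this
  tauto

theorem capPart_delim (c : Char) (hc : c = '-' ∨ c = ' ') : capPart [c] = [c] := by
  rcases hc with h | h <;> subst h <;> decide

theorem capPart_append_nondelim (cur : List Char) (c : Char)
    (hcur : ∀ x ∈ cur, ¬ (x = '-' ∨ x = ' ')) (hc : ¬ (c = '-' ∨ c = ' ')) :
    capPart (cur ++ [c]) = capPart cur ++ [if cur.isEmpty then PySem.Chars.upperChar c else c] := by
  cases cur with
  | nil => simp [capPart_nil, capPart_cons_nondelim c [] hc]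
  | cons d t =>
      have hd : ¬ (d = '-' ∨ d = ' ') := hcur d (by simp)
      rw [show (d :: t) ++ [c] = d :: (t ++ [c]) by simp,
          capPart_cons_nondelim d (t ++ [c]) hd, capPart_cons_nondelim d t hd]
      simp

-- loop invariant: B's accumulator is A's parts (capitalized and joined) plus the capitalized current part
theorem main_inv (cs : List Char) : ∀ (parts : List (List Char)) (cur : List Char),
    (∀ x ∈ cur, ¬ (x = '-' ∨ x = ' ')) →
    (cs.foldl stepB ((parts.map capPart).flatten ++ capPart cur, cur.isEmpty)).1
      = (((cs.foldl stepA (parts, cur)).1.map capPart).flatten)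
        ++ capPart (cs.foldl stepA (parts, cur)).2 := by
  induction cs with
  | nil => intro parts cur _; simp
  | cons c rest ih =>
      intro parts cur hcur
      by_cases hc : c = '-' ∨ c = ' '
      · have hB : stepB ((parts.map capPart).flatten ++ capPart cur, cur.isEmpty) c
            = ((parts.map capPart).flatten ++ capPart cur ++ [c], true) := by
          simp [stepB, hc]
        have hA : stepA (parts, cur) c = (parts ++ [cur, [c]], []) := by
          simp [stepA, hc]
        have := ih (parts ++ [cur, [c]]) [] (by simp)
        simp only [List.foldl_cons, hB, hA]
        simpa [capPart_nil, capPart_delim c hc, List.append_assoc] using this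
      · have hB : stepB ((parts.map capPart).flatten ++ capPart cur, cur.isEmpty) c
            = ((parts.map capPart).flatten ++ capPart (cur ++ [c]), false) := by
          simp only [stepB, if_neg hc, capPart_append_nondelim cur c hcur hc]
          simp
        have hA : stepA (parts, cur) c = (parts, cur ++ [c]) := by
          simp [stepA, hc]
        have := ih parts (cur ++ [c])
          (by intro x hx; rcases List.mem_append.1 hx with h | h
              · exact hcur x h
              · simp at h; subst h; exact hc)
        simp only [List.foldl_cons, hB, hA]
        have he : (cur ++ [c]).isEmpty = false := by simp
        rw [he] at this
        exact this

-- A's final conditional append of current_part is absorbed by capPart [] = []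
theorem finalA_eq (st : List (List Char) × List Char) :
    (((finalParts st).map capPart).flatten)
      = ((st.1.map capPart).flatten) ++ capPart st.2 := by
  unfold finalParts; by_cases h : st.2 = [] <;> simp [h, capPart_nil]

-- ===== VERDICT (by name: the statement is the Claim_ definition above) =====
theorem fix_capitalization_spec : Claim_equal_fix_capitalization := by
  intro name _
  unfold Spec_fix_capitalization fix_capitalization fix_capitalization_alt
  by_cases h : name.toList = []
  · simp [h]
  · rw [if_neg h]
    have := main_inv name.toList [] [] (by simp)
    simp only [List.map_nil, List.flatten_nil, capPart_nil, List.append_nil,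
      List.isEmpty_nil] at this
    rw [finalA_eq, ← this]
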